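-- pv_equiv track=rewrite | github.com/roblangtry/wsta-qa-project | entity_tagger.py | contigous_tagging
-- ===== SOURCE A (Python) =====
-- def contigous_tagging(in_list):
--     tag = 'O'
--     content = ''
--     out_list = []
--     for tup in in_list:
--         if tag == tup[0]:
--             content += ' '
--             content += tup[1]
--         else:
--             if tag != 'O':
--                 out_list.append((tag, content))
--             tag = tup[0]
--             content = tup[1]
--     if tag != 'O':
--         out_list.append((tag, content))
--     return out_list
-- ===== SOURCE B (Python) =====
-- def contigous_tagging(in_list):
--     out = []
--     i = 0
--     n = len(in_list)
--     while i < n: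
--         tag = in_list[i][0]
--         j = i
--         while j < n and in_list[j][0] == tag:
--             j += 1
--         if tag != 'O':
--             out.append((tag, ' '.join(word for _, word in in_list[i:j])))
--         i = j
--     return out
-- ===== Notes on version B (the rewrite author's own statement) =====
-- stated objective: alternative
-- what changed: Replaces the tag/content accumulator loop with post-loop flush by explicit extraction of maximal same-tag runs (inner scan + ' '.join), filtering out 'O' runs.
import Mathlib
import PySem

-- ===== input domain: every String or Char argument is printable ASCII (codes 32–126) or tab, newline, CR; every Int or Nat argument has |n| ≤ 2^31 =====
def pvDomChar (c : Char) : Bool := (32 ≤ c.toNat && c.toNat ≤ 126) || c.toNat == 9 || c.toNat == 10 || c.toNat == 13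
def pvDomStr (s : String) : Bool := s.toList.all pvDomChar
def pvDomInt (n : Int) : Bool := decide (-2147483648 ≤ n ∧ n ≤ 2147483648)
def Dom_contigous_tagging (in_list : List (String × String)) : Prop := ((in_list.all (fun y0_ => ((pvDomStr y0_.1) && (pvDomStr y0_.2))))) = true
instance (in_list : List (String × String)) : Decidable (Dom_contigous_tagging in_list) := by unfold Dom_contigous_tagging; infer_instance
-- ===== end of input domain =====

-- B replaces A's tag/content accumulator loop (with its post-loop flush) by explicit
-- extraction of maximal same-tag runs, joining each non-'O' run's words with ' '.join.

-- ===== PORT A =====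
-- loop state: (tag, content, out_list)
def pvAStep (s : String × String × List (String × String)) (tup : String × String) :
    String × String × List (String × String) :=
  if s.1 == tup.1 then (s.1, s.2.1 ++ " " ++ tup.2, s.2.2)
  else (tup.1, tup.2, if s.1 != "O" then s.2.2 ++ [(s.1, s.2.1)] else s.2.2)

def contigous_tagging (in_list : List (String × String)) : List (String × String) :=
  let s := in_list.foldl pvAStep ("O", "", [])
  if s.1 != "O" then s.2.2 ++ [(s.1, s.2.1)] else s.2.2

-- ===== PORT B =====
-- run extraction: the inner `while j < n and in_list[j][0] == tag` scan is takeWhile/dropWhile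
def pvAltGo : List (String × String) → List (String × String)
  | [] => []
  | (t, w) :: rest =>
    let run := rest.takeWhile (fun p => p.1 == t)
    let rest' := rest.dropWhile (fun p => p.1 == t)
    (if t != "O" then [(t, PySem.Str.join " " (w :: run.map Prod.snd))] else []) ++ pvAltGo rest'
termination_by l => l.length
decreasing_by
  simp only [List.length_cons]
  exact Nat.lt_succ_of_le (List.length_dropWhile_le _ _)

def contigous_tagging_alt (in_list : List (String × String)) : List (String × String) :=
  pvAltGo in_list

-- ===== PRECONDITION & SPEC =====
def Spec_contigous_tagging (in_list : List (String × String)) (out : List (String × String)) : Prop := out = contigous_tagging_alt in_list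
instance (in_list : List (String × String)) (out : List (String × String)) : Decidable (Spec_contigous_tagging in_list out) := by unfold Spec_contigous_tagging; infer_instance

-- ===== CLAIM (what is proved, stated in full; the proofs are below) =====
def Claim_equal_contigous_tagging : Prop := ∀ (in_list : List (String × String)), Dom_contigous_tagging in_list → Spec_contigous_tagging in_list (contigous_tagging in_list)

-- ===== LEMMAS AND PROOFS =====

-- A's final flush
def pvFlush (s : String × String × List (String × String)) : List (String × String) :=
  if s.1 != "O" then s.2.2 ++ [(s.1, s.2.1)] else s.2.2

-- the out_list accumulator factors out of A's loop
lemma pvFold_out (l : List (String × String)) (t c : String) (out : List (String × String)) :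
    l.foldl pvAStep (t, c, out) =
      ((l.foldl pvAStep (t, c, [])).1, (l.foldl pvAStep (t, c, [])).2.1,
        out ++ (l.foldl pvAStep (t, c, [])).2.2) := by
  induction l generalizing t c out with
  | nil => simp
  | cons hd tl ih =>
    simp only [List.foldl_cons, pvAStep]
    by_cases h : (t == hd.1) = true
    · rw [if_pos h, if_pos h]
      exact ih _ _ _
    · rw [if_neg h, if_neg h]
      by_cases h2 : (t != "O") = true
      · rw [if_pos h2, if_pos h2]
        rw [ih hd.1 hd.2 (out ++ [(t, c)]), ih hd.1 hd.2 ([] ++ [(t, c)])]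
        simp
      · rw [if_neg h2, if_neg h2]
        exact ih _ _ _

lemma pvJoin_singleton (w : String) : PySem.Str.join " " [w] = w := by
  apply String.toList_inj.mp
  rw [PySem.Str.toList_join]
  simp only [List.map_cons, List.map_nil]
  rw [PySem.Chars.join_singleton]

lemma pvJoin_merge (a b : String) (ws : List String) :
    PySem.Str.join " " ((a ++ " " ++ b) :: ws) = PySem.Str.join " " (a :: b :: ws) := by
  apply String.toList_inj.mp
  cases ws with
  | nil =>
    rw [PySem.Str.toList_join, PySem.Str.toList_join]
    simp only [List.map_cons, List.map_nil]
    rw [PySem.Chars.join_singleton, PySem.Chars.join_cons_cons, PySem.Chars.join_singleton]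
    simp [String.toList_append, List.append_assoc]
  | cons c ws' =>
    rw [PySem.Str.toList_join, PySem.Str.toList_join]
    simp only [List.map_cons]
    rw [PySem.Chars.join_cons_cons, PySem.Chars.join_cons_cons, PySem.Chars.join_cons_cons]
    simp [String.toList_append, List.append_assoc]

-- pvAltGo ignores a leading block of 'O'-tagged pairs
lemma pvAltGo_dropO (l : List (String × String)) :
    pvAltGo (l.dropWhile (fun p => p.1 == "O")) = pvAltGo l := by
  induction l with
  | nil => rfl
  | cons hd tl ih =>
    obtain ⟨t, w⟩ := hd
    by_cases h : t = "O"
    · subst h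
      rw [List.dropWhile_cons_of_pos (by simp)]
      conv_rhs => rw [pvAltGo]
      simp
    · rw [List.dropWhile_cons_of_neg (by simpa using h)]

-- flushing commutes with a pre-filled out_list
lemma pvFlush_out (out : List (String × String)) (p : String × String × List (String × String)) :
    pvFlush (p.1, p.2.1, out ++ p.2.2) = out ++ pvFlush p := by
  unfold pvFlush; split <;> simp

-- main invariant: flushing A's loop from state (t, w, []) is B's run decomposition
lemma pvMain (l : List (String × String)) : ∀ t w,
    pvFlush (l.foldl pvAStep (t, w, [])) =
      if t == "O" then pvAltGo l
      else (t, PySem.Str.join " " (w :: (l.takeWhile (fun p => p.1 == t)).map Prod.snd)) ::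
        pvAltGo (l.dropWhile (fun p => p.1 == t)) := by
  induction l with
  | nil =>
    intro t w
    by_cases h : t = "O"
    · subst h; simp [pvFlush, pvAltGo]
    · simp [pvFlush, h, pvAltGo, pvJoin_singleton]
  | cons hd tl ih =>
    intro t w
    obtain ⟨t', w'⟩ := hd
    simp only [List.foldl_cons, pvAStep]
    by_cases h : t = t'
    · -- same tag: content grows, out unchanged
      subst h
      rw [if_pos (by simp)]
      by_cases hO : t = "O"
      · subst hO
        rw [ih "O" (w ++ " " ++ w')]
        rw [if_pos (by simp), if_pos (by simp)]
        conv_rhs => rw [pvAltGo]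
        rw [← pvAltGo_dropO tl]
        simp
      · rw [ih t (w ++ " " ++ w'), if_neg (by simpa using hO), if_neg (by simpa using hO)]
        rw [List.takeWhile_cons_of_pos (by simp), List.dropWhile_cons_of_pos (by simp)]
        simp [pvJoin_merge]
    · -- tag changes
      have hne : (t' == t) = false := by simp [Ne.symm h]
      rw [if_neg (by simpa using h)]
      by_cases hO : t = "O"
      · -- old tag is 'O': nothing flushed, restart at (t', w', [])
        subst hO
        have h2 : ¬ t' = "O" := fun hx => h hx.symm
        rw [if_neg (by simp), if_pos (by simp), ih t' w', if_neg (by simpa using h2)]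
        conv_rhs => rw [pvAltGo]
        simp [h2]
      · -- old tag flushed as (t, w); remainder restarts at (t', w', [])
        rw [if_pos (by simpa using hO)]
        simp only [List.nil_append]
        rw [pvFold_out tl t' w' [(t, w)], pvFlush_out [(t, w)], ih t' w']
        by_cases h2 : t' = "O"
        · subst h2
          rw [if_pos (by simp), if_neg (by simpa using hO)]
          rw [List.takeWhile_cons_of_neg (by simp [hne]), List.dropWhile_cons_of_neg (by simp [hne])]
          simp only [List.map_nil]
          rw [pvJoin_singleton]
          conv_rhs => rw [pvAltGo]
          rw [← pvAltGo_dropO tl]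
          simp
        · rw [if_neg (by simpa using h2), if_neg (by simpa using hO)]
          rw [List.takeWhile_cons_of_neg (by simp [hne]), List.dropWhile_cons_of_neg (by simp [hne])]
          simp only [List.map_nil]
          rw [pvJoin_singleton]
          conv_rhs => rw [pvAltGo]
          simp [h2]

-- ===== VERDICT (by name: the statement is the Claim_ definition above) =====
theorem contigous_tagging_spec : Claim_equal_contigous_tagging := by
  intro l _
  unfold Spec_contigous_tagging contigous_tagging contigous_tagging_alt
  have := pvMain l "O" ""
  rw [if_pos (by simp)] at this
  simpa [pvFlush] using this
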